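-- pv_equiv track=rewrite | github.com/atajanatayev1441-dev/wallet | main.py | make_keyboard
-- ===== SOURCE A (Python) =====
-- def make_keyboard(buttons, row_width=2):
--     keyboard = []
--     row = []
--     for i, (text, callback_data) in enumerate(buttons, 1):
--         row.append({"text": text, "callback_data": callback_data})
--         if i % row_width == 0:
--             keyboard.append(row)
--             row = []
--     if row:
--         keyboard.append(row)
--     return {"inline_keyboard": keyboard}
-- ===== SOURCE B (Python) =====
-- def make_keyboard(buttons, row_width=2):
--     items = [{"text": text, "callback_data": data} for text, data in buttons]
--     rows = [items[i:i + row_width] for i in range(0, len(items), row_width)]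
--     return {"inline_keyboard": rows}
-- ===== Notes on version B (the rewrite author's own statement) =====
-- stated objective: simpler
-- what changed: Replaces the running-row accumulator with modulo-triggered flushes by a build-then-chunk shape (map all buttons to dicts, then slice into rows with a stepped range); Pre_ restricts to the natural domain of positive row widths: at row_width = 0 A raises ZeroDivisionError on nonempty buttons (B raises ValueError), and for negative row_width with nonempty buttons A's chunking by |row_width| is an accident of Python's negative modulo.
-- outside the precondition, e.g. on make_keyboard([], 0): A returns {'inline_keyboard': []}, B raises ValueError
import Mathlib
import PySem

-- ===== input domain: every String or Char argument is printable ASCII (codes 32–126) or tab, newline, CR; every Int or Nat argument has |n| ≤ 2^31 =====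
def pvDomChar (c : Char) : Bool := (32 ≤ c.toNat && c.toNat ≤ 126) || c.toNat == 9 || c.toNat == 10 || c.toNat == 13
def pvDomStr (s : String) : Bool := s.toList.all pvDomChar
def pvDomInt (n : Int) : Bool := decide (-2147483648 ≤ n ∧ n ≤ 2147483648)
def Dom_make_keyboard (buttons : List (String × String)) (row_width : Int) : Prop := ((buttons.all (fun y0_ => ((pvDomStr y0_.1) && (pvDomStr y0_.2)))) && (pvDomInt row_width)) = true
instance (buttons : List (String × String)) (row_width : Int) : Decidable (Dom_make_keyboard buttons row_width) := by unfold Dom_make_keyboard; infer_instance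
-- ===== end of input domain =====

-- B builds the full list of button dicts once and chunks it into rows by slicing with a
-- stepped range, instead of A's running-row accumulator with modulo flushes (objective: simpler).


-- ===== PORT A =====
-- state: (keyboard, row, i); i is the 1-based enumerate counter
def make_keyboard (buttons : List (String × String)) (row_width : Int) : List (String × List (List (List (String × String)))) :=
  let fin := buttons.foldl
    (fun (st : List (List (List (String × String))) × List (List (String × String)) × Int) tc =>
      let row' := st.2.1 ++ [[("text", tc.1), ("callback_data", tc.2)]]
      if PySem.Int.mod st.2.2 row_width = 0 then (st.1 ++ [row'], [], st.2.2 + 1)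
      else (st.1, row', st.2.2 + 1))
    ([], [], 1)
  let keyboard := if fin.2.1 ≠ [] then fin.1 ++ [fin.2.1] else fin.1
  [("inline_keyboard", keyboard)]

-- ===== PORT B =====
def make_keyboard_alt (buttons : List (String × String)) (row_width : Int) : List (String × List (List (List (String × String)))) :=
  let items := buttons.map (fun tc => [("text", tc.1), ("callback_data", tc.2)])
  let rows := (PySem.List.pyRange 0 (items.length : Int) row_width).map
    (fun i => PySem.List.slice items (some i) (some (i + row_width)))
  [("inline_keyboard", rows)]

-- ===== PRECONDITION & SPEC =====
-- Pre_ restricts to the natural domain of positive row widths (plus the trivial empty-keyboard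
-- inputs with a negative width, where both return an empty keyboard): at row_width = 0 A raises
-- ZeroDivisionError on nonempty buttons (B raises ValueError there and on empty buttons), and for
-- negative row_width with nonempty buttons A's chunking by |row_width| is an accident of Python's
-- negative modulo, outside the function's natural domain.
def Pre_make_keyboard (buttons : List (String × String)) (row_width : Int) : Prop :=
  0 < row_width ∨ (buttons = [] ∧ row_width < 0)
instance (buttons : List (String × String)) (row_width : Int) : Decidable (Pre_make_keyboard buttons row_width) := by unfold Pre_make_keyboard; infer_instance
def pvWitness_make_keyboard : (List (String × String)) × Int := ([("a", "1"), ("b", "2"), ("c", "3")], 2)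
def Spec_make_keyboard (buttons : List (String × String)) (row_width : Int) (out : List (String × List (List (List (String × String))))) : Prop := out = make_keyboard_alt buttons row_width
instance (buttons : List (String × String)) (row_width : Int) (out : List (String × List (List (List (String × String))))) : Decidable (Spec_make_keyboard buttons row_width out) := by unfold Spec_make_keyboard; infer_instance

-- ===== CLAIM (what is proved, stated in full; the proofs are below) =====
def Claim_equal_make_keyboard : Prop := ∀ (buttons : List (String × String)) (row_width : Int), Dom_make_keyboard buttons row_width → Pre_make_keyboard buttons row_width → Spec_make_keyboard buttons row_width (make_keyboard buttons row_width)

-- ===== LEMMAS AND PROOFS =====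

-- proof-side reference: greedy chunking into pieces of w
def pvChunks {α : Type} (w : Nat) (l : List α) : List (List α) :=
  if _h : w = 0 ∨ l = [] then [] else l.take w :: pvChunks w (l.drop w)
termination_by l.length
decreasing_by
  rcases l with _ | ⟨x, l⟩
  · simp at _h
  · simp; omega

lemma pvChunks_nil {α : Type} (w : Nat) : pvChunks (α := α) w [] = [] := by
  unfold pvChunks; simp

lemma pvChunks_of_short {α : Type} (w : Nat) (l : List α) (hl : l ≠ []) (hlt : l.length < w) :
    pvChunks w l = [l] := by
  unfold pvChunks
  rw [dif_neg (by simp [hl]; omega)]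
  rw [List.take_of_length_le (by omega), List.drop_eq_nil_of_le (by omega), pvChunks_nil]

lemma pvChunks_cons_full {α : Type} (w : Nat) (hw : 0 < w) (r l : List α) (hr : r.length = w) :
    pvChunks w (r ++ l) = r :: pvChunks w l := by
  conv_lhs => rw [pvChunks]
  rw [dif_neg (by rcases r with _ | _ <;> simp_all; omega)]
  rw [List.take_append_of_le_length (by omega), List.take_of_length_le (by omega),
      List.drop_append_of_le_length (by omega), List.drop_eq_nil_of_le (by omega)]
  simp

lemma pvPyRange_pos_nil (a b s : Int) (hs : 0 < s) (hab : b ≤ a) :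
    PySem.List.pyRange a b s = [] := by
  rw [PySem.List.pyRange_of_pos _ _ hs, if_neg (by omega)]
  simp

-- cons form of pyRange for an arbitrary positive step
lemma pvPyRange_pos_cons (a b s : Int) (hs : 0 < s) (hab : a < b) :
    PySem.List.pyRange a b s = a :: PySem.List.pyRange (a + s) b s := by
  rw [PySem.List.pyRange_of_pos _ _ hs, PySem.List.pyRange_of_pos _ _ hs]
  rw [if_pos hab]
  by_cases h : a + s < b
  · rw [if_pos h]
    have he : b - a + s - 1 = (b - (a + s) + s - 1) + 1 * s := by ring
    have hd : (b - a + s - 1) / s = (b - (a + s) + s - 1) / s + 1 := by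
      rw [he, Int.add_mul_ediv_right _ _ (by omega)]
    have hnn : 0 ≤ (b - (a + s) + s - 1) / s := Int.ediv_nonneg (by omega) (by omega)
    rw [hd, show ((b - (a + s) + s - 1) / s + 1).toNat = ((b - (a + s) + s - 1) / s).toNat + 1 by omega,
        List.range_succ_eq_map]
    simp only [List.map_cons, List.map_map]
    congr 1
    · simp
    · apply List.map_congr_left
      intro k _
      simp only [Function.comp]
      push_cast
      ring
  · rw [if_neg h]
    have h1 : (b - a + s - 1) / s = 1 := by
      have he : b - a + s - 1 = (b - a - 1) + 1 * s := by ring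
      rw [he, Int.add_mul_ediv_right _ _ (by omega),
          Int.ediv_eq_zero_of_lt (by omega) (by omega)]
      norm_num
    rw [h1]
    norm_num

-- B's slicing loop computes pvChunks, from any aligned start offset
lemma pvB_chunks {α : Type} (w : Nat) (hw : 0 < w) (items : List α) :
    ∀ (a : Nat),
    (PySem.List.pyRange (a : Int) (items.length : Int) (w : Int)).map
      (fun i => PySem.List.slice items (some i) (some (i + (w : Int))))
    = pvChunks w (items.drop a) := by
  intro a
  by_cases h : a < items.length
  · rw [pvPyRange_pos_cons _ _ _ (by exact_mod_cast hw) (by exact_mod_cast h)]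
    simp only [List.map_cons]
    rw [PySem.List.slice_natCast_add items a w]
    have hrec := pvB_chunks w hw items (a + w)
    push_cast at hrec ⊢
    rw [hrec]
    rw [← List.drop_drop]
    conv_rhs => rw [pvChunks]
    rw [dif_neg (by
      rintro (h0 | hnil)
      · omega
      · rw [List.drop_eq_nil_iff] at hnil
        omega)]
  · rw [pvPyRange_pos_nil _ _ _ (by exact_mod_cast hw) (by exact_mod_cast (by omega : items.length ≤ a))]
    rw [List.drop_eq_nil_of_le (by omega), pvChunks_nil]
    simp
termination_by a => items.length - a
decreasing_by omega

-- the divisibility reading of A's flush condition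
lemma pvMod_flush (rw_ : Int) (j : Nat) :
    (PySem.Int.mod ((j : Int) + 1) rw_ = 0) ↔ ((j + 1) % rw_.natAbs = 0) := by
  rw [PySem.Int.mod_eq_zero_iff_dvd]
  rw [← Nat.dvd_iff_mod_eq_zero]
  constructor
  · intro hd
    have h1 : (rw_.natAbs : Int) ∣ ((j : Int) + 1) := (Int.natAbs_dvd).mpr hd
    exact_mod_cast h1
  · intro hd
    apply (Int.natAbs_dvd).mp
    exact_mod_cast hd

-- A's loop invariant: from counter j+1 with a partial row of length j % w,
-- the flushed result is the accumulated keyboard plus greedy chunks of the rest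
lemma pvA_inv (rw_ : Int) (hrw : rw_ ≠ 0) :
    ∀ (l : List (String × String)) (kb : List (List (List (String × String))))
      (row : List (List (String × String))) (j : Nat),
      row.length = j % rw_.natAbs →
      (let fin := l.foldl
        (fun (st : List (List (List (String × String))) × List (List (String × String)) × Int) tc =>
          let row' := st.2.1 ++ [[("text", tc.1), ("callback_data", tc.2)]]
          if PySem.Int.mod st.2.2 rw_ = 0 then (st.1 ++ [row'], [], st.2.2 + 1)
          else (st.1, row', st.2.2 + 1))
        (kb, row, (j : Int) + 1)
       if fin.2.1 ≠ [] then fin.1 ++ [fin.2.1] else fin.1)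
      = kb ++ pvChunks rw_.natAbs (row ++ l.map (fun tc => [("text", tc.1), ("callback_data", tc.2)])) := by
  have hw : 0 < rw_.natAbs := by omega
  intro l
  induction l with
  | nil =>
    intro kb row j hrow
    simp only [List.foldl_nil, List.map_nil, List.append_nil]
    by_cases hr : row = []
    · subst hr; simp [pvChunks_nil]
    · simp only [hr, ne_eq, not_false_iff, if_true]
      rw [pvChunks_of_short _ _ hr (by rw [hrow]; exact Nat.mod_lt _ hw)]
  | cons tc l ih =>
    intro kb row j hrow
    simp only [List.foldl_cons]
    by_cases hm : PySem.Int.mod ((j : Int) + 1) rw_ = 0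
    · rw [if_pos hm]
      have hdvd := (pvMod_flush rw_ j).mp hm
      have hmod := Nat.mod_add_mod j rw_.natAbs 1
      have hlt0 := Nat.mod_lt j hw
      have hfull : j % rw_.natAbs + 1 = rw_.natAbs := by
        by_contra hne
        rw [Nat.mod_eq_of_lt (by omega)] at hmod
        omega
      have hrow' : (row ++ [[("text", tc.1), ("callback_data", tc.2)]]).length = rw_.natAbs := by
        simp [hrow]
        omega
      have hnext : (0 : Nat) = (j + 1) % rw_.natAbs := by omega
      have := ih (kb ++ [row ++ [[("text", tc.1), ("callback_data", tc.2)]]]) [] (j + 1)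
        (by simpa using hnext)
      push_cast at this ⊢
      rw [show (j : Int) + 1 + 1 = ((j : Int) + 1) + 1 by ring] at this
      rw [this]
      simp only [List.nil_append, List.map_cons, List.append_assoc, List.cons_append]
      rw [show row ++ [("text", tc.1), ("callback_data", tc.2)] :: List.map (fun tc => [("text", tc.1), ("callback_data", tc.2)]) l
            = (row ++ [[("text", tc.1), ("callback_data", tc.2)]]) ++ List.map (fun tc => [("text", tc.1), ("callback_data", tc.2)]) l by simp]
      rw [pvChunks_cons_full _ hw _ _ hrow']
    · rw [if_neg hm]
      have hnd := (not_iff_not.mpr (pvMod_flush rw_ j)).mp hm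
      have hmod := Nat.mod_add_mod j rw_.natAbs 1
      have hlt0 := Nat.mod_lt j hw
      have hsm : j % rw_.natAbs + 1 < rw_.natAbs ∨ j % rw_.natAbs + 1 = rw_.natAbs := by omega
      have hnext : (row ++ [[("text", tc.1), ("callback_data", tc.2)]]).length = (j + 1) % rw_.natAbs := by
        rcases hsm with hlt | heq
        · rw [Nat.mod_eq_of_lt hlt] at hmod
          simp [hrow]
          omega
        · exfalso
          rw [heq, Nat.mod_self] at hmod
          omega
      have := ih kb (row ++ [[("text", tc.1), ("callback_data", tc.2)]]) (j + 1) hnext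
      push_cast at this ⊢
      rw [show (j : Int) + 1 + 1 = ((j : Int) + 1) + 1 by ring] at this
      rw [this]
      simp

-- ===== VERDICT (by name: the statement is the Claim_ definition above) =====
theorem make_keyboard_spec : Claim_equal_make_keyboard := by
  intro buttons row_width _hdom hpre
  unfold Spec_make_keyboard
  rcases hpre with hpos | ⟨hnil, _hneg⟩
  · have hrw : row_width ≠ 0 := by omega
    have hw : 0 < row_width.natAbs := by omega
    have hc : ((row_width.natAbs : Nat) : Int) = row_width := by omega
    have hA := pvA_inv row_width hrw buttons [] [] 0 (by simp)
    simp only [Nat.cast_zero, zero_add, List.nil_append] at hA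
    have hB := pvB_chunks row_width.natAbs hw
      (buttons.map (fun tc => [("text", tc.1), ("callback_data", tc.2)])) 0
    simp only [Nat.cast_zero, List.drop_zero] at hB
    have hBside : make_keyboard_alt buttons row_width
        = [("inline_keyboard", pvChunks row_width.natAbs
            (buttons.map (fun tc => [("text", tc.1), ("callback_data", tc.2)])))] := by
      simp only [make_keyboard_alt]
      rw [← hc, hB, Int.natAbs_natCast]
    rw [hBside]
    simp only [make_keyboard]
    rw [hA]
  · subst hnil
    simp [make_keyboard, make_keyboard_alt, PySem.List.pyRange]
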